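-- pv_equiv track=rewrite | github.com/Commandershadow9/shadowops-bot | src/patch_notes/stages/distribute.py | _group_changes_for_embed
-- ===== SOURCE A (Python) =====
-- _SECTION_ORDER = [
--     ("🆕 Neue Features", ("feature", "content")),
--     ("🎮 Gameplay & UX", ("gameplay", "multiplayer")),
--     ("🎨 Design & Look", ("design",)),
--     ("⚡ Performance", ("performance",)),
--     ("🐛 Fixes", ("fix",)),
--     ("🛡️ Stabilität & Security", ("security", "infrastructure", "breaking")),
--     ("📖 Weiteres", ("improvement", "docs", "refactor")),
-- ]
--
-- def _group_changes_for_embed(changes: list[dict]) -> list[tuple[str, list[dict]]]: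
--     """Gruppiere Changes nach Typ für Section-Header im Embed.
--
--     Unbekannte Typen landen in 'Weiteres'. Reihenfolge wie _SECTION_ORDER.
--     """
--     buckets: dict[str, list[dict]] = {title: [] for title, _ in _SECTION_ORDER}
--     fallback = "📖 Weiteres"
--     for c in changes:
--         ctype = (c.get('type') or '').lower()
--         placed = False
--         for title, types in _SECTION_ORDER:
--             if ctype in types:
--                 buckets[title].append(c)
--                 placed = True
--                 break
--         if not placed:
--             buckets[fallback].append(c)
--     return [(title, buckets[title]) for title, _ in _SECTION_ORDER if buckets[title]]
-- ===== SOURCE B (Python) =====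
-- _SECTION_ORDER = [
--     ("🆕 Neue Features", ("feature", "content")),
--     ("🎮 Gameplay & UX", ("gameplay", "multiplayer")),
--     ("🎨 Design & Look", ("design",)),
--     ("⚡ Performance", ("performance",)),
--     ("🐛 Fixes", ("fix",)),
--     ("🛡️ Stabilität & Security", ("security", "infrastructure", "breaking")),
--     ("📖 Weiteres", ("improvement", "docs", "refactor")),
-- ]
--
-- _FALLBACK = "📖 Weiteres"
--
-- _TYPE_TO_TITLE = {t: title for title, types in _SECTION_ORDER for t in types}
--
--
-- def _group_changes_for_embed(changes):
--     """Label every change with its section title once, then collect each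
--     section's group by a per-section filter (no mutable buckets, no inner
--     scan with a placed flag)."""
--     labeled = [(_TYPE_TO_TITLE.get((c.get('type') or '').lower(), _FALLBACK), c)
--                for c in changes]
--     out = []
--     for title, _ in _SECTION_ORDER:
--         group = [c for t, c in labeled if t == title]
--         if group:
--             out.append((title, group))
--     return out
-- ===== Notes on version B (the rewrite author's own statement) =====
-- stated objective: simpler
-- what changed: Replaces the nested scan over _SECTION_ORDER with a placed flag and mutable per-title buckets by a precomputed type-to-title table, a single labelling pass over the changes, and a per-section filter of the labelled list.
import Mathlib
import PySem

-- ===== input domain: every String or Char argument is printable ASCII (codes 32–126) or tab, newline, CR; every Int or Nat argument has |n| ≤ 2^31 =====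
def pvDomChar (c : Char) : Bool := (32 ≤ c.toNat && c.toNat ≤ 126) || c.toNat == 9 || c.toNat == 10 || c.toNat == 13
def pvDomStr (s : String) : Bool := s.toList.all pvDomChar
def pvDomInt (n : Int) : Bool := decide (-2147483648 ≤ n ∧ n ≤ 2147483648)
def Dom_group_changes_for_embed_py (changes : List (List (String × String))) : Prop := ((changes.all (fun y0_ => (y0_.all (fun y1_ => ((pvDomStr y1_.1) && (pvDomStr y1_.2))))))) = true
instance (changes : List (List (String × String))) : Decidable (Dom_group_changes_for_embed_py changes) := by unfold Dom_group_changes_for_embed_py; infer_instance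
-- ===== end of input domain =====

-- B groups by a precomputed type→title table and a per-section filter of a labelled list,
-- instead of A's nested scan with a placed flag into mutable buckets (objective: simpler).

-- shared module constant _SECTION_ORDER
def pvSectionOrder : List (String × List String) := [
  ("🆕 Neue Features", ["feature", "content"]),
  ("🎮 Gameplay & UX", ["gameplay", "multiplayer"]),
  ("🎨 Design & Look", ["design"]),
  ("⚡ Performance", ["performance"]),
  ("🐛 Fixes", ["fix"]),
  ("🛡️ Stabilität & Security", ["security", "infrastructure", "breaking"]),
  ("📖 Weiteres", ["improvement", "docs", "refactor"])]

-- ===== PORT A =====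
-- inner 'for title, types in _SECTION_ORDER: … break' loop with the placed flag
def pvScanA (ctype : String) (c : List (String × String)) :
    List (String × List String) → PySem.Dict String (List (List (String × String))) →
    PySem.Dict String (List (List (String × String))) × Bool
  | [], d => (d, false)
  | (title, types) :: rest, d =>
    if types.contains ctype then (d.modify title [] (fun l => l ++ [c]), true)
    else pvScanA ctype c rest d

def group_changes_for_embed_py (changes : List (List (String × String))) :
    List (String × (List (List (String × String)))) :=
  let buckets0 : PySem.Dict String (List (List (String × String))) :=
    pvSectionOrder.foldl (fun d p => d.insert p.1 []) PySem.Dict.empty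
  let fallback := "📖 Weiteres"
  let buckets := changes.foldl (fun d c =>
    let ctype := PySem.Str.lower ((PySem.Dict.mk c).getD "type" "")
    let r := pvScanA ctype c pvSectionOrder d
    if r.2 then r.1 else r.1.modify fallback [] (fun l => l ++ [c])) buckets0
  (pvSectionOrder.filter (fun p => !(buckets.getD p.1 []).isEmpty)).map
    (fun p => (p.1, buckets.getD p.1 []))

-- ===== PORT B =====
-- _TYPE_TO_TITLE = {t: title for title, types in _SECTION_ORDER for t in types}
def pvTypeToTitle : PySem.Dict String String :=
  pvSectionOrder.foldl (fun d p => p.2.foldl (fun d' t => d'.insert t p.1) d) PySem.Dict.empty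

def group_changes_for_embed_py_alt (changes : List (List (String × String))) :
    List (String × (List (List (String × String)))) :=
  let labeled := changes.map (fun c =>
    (pvTypeToTitle.getD (PySem.Str.lower ((PySem.Dict.mk c).getD "type" "")) "📖 Weiteres", c))
  pvSectionOrder.foldl (fun out p =>
    let group := (labeled.filter (fun q => q.1 == p.1)).map (fun q => q.2)
    if !group.isEmpty then out ++ [(p.1, group)] else out) []

-- ===== PRECONDITION & SPEC =====
def Spec_group_changes_for_embed_py (changes : List (List (String × String))) (out : List (String × (List (List (String × String))))) : Prop := out = group_changes_for_embed_py_alt changes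
instance (changes : List (List (String × String))) (out : List (String × (List (List (String × String))))) : Decidable (Spec_group_changes_for_embed_py changes out) := by unfold Spec_group_changes_for_embed_py; infer_instance

-- ===== CLAIM (what is proved, stated in full; the proofs are below) =====
def Claim_equal_group_changes_for_embed_py : Prop := ∀ (changes : List (List (String × String))), Dom_group_changes_for_embed_py changes → Spec_group_changes_for_embed_py changes (group_changes_for_embed_py changes)

-- ===== LEMMAS AND PROOFS =====
-- A's routing of one change: first section whose type tuple contains the (lowered) type
def pvFind (s : String) : List (String × List String) → Option String
  | [] => none
  | (title, types) :: rest => if types.contains s then some title else pvFind s rest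

def pvLabel (c : List (String × String)) : String :=
  (pvFind (PySem.Str.lower ((PySem.Dict.mk c).getD "type" "")) pvSectionOrder).getD "📖 Weiteres"

lemma pvScanA_eq (ctype : String) (c : List (String × String))
    (secs : List (String × List String)) (d : PySem.Dict String (List (List (String × String)))) :
    pvScanA ctype c secs d =
      (match pvFind ctype secs with
       | some t => (d.modify t [] (fun l => l ++ [c]), true)
       | none => (d, false)) := by
  induction secs with
  | nil => rfl
  | cons p rest ih =>
    obtain ⟨title, types⟩ := p
    by_cases h : ctype ∈ types
    · simp [pvScanA, pvFind, h]
    · simp [pvScanA, pvFind, h, ih]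

lemma pvBody_eq (d : PySem.Dict String (List (List (String × String)))) (c : List (String × String)) :
    (let ctype := PySem.Str.lower ((PySem.Dict.mk c).getD "type" "")
     let r := pvScanA ctype c pvSectionOrder d
     if r.2 then r.1 else r.1.modify "📖 Weiteres" [] (fun l => l ++ [c])) =
    d.modify (pvLabel c) [] (fun l => l ++ [c]) := by
  simp only [pvScanA_eq, pvLabel]
  cases h : pvFind (PySem.Str.lower ((PySem.Dict.mk c).getD "type" "")) pvSectionOrder with
  | none => simp
  | some t => simp

lemma pvBuckets0_getD (t : String) :
    (pvSectionOrder.foldl (fun d p => d.insert p.1 ([] : List (List (String × String)))) PySem.Dict.empty).getD t [] = [] := by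
  rcases hf : (pvSectionOrder.foldl (fun d p => d.insert p.1 ([] : List (List (String × String)))) PySem.Dict.empty).get? t with _ | v
  · simp [PySem.Dict.getD_eq_get?_getD, hf]
  · have hx := PySem.Dict.mem_items_of_get?_eq_some _ hf
    simp [pvSectionOrder, PySem.Dict.insert, PySem.Dict.empty, PySem.Dict.contains, Prod.ext_iff] at hx
    simp [PySem.Dict.getD_eq_get?_getD, hf]
    tauto

-- A's scan and B's flat table send every (lowered) type string to the same title
lemma pvTable_eq (s : String) :
    (pvFind s pvSectionOrder).getD "📖 Weiteres" = pvTypeToTitle.getD s "📖 Weiteres" := by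
  by_cases h1 : s = "feature"; · subst h1; decide
  by_cases h2 : s = "content"; · subst h2; decide
  by_cases h3 : s = "gameplay"; · subst h3; decide
  by_cases h4 : s = "multiplayer"; · subst h4; decide
  by_cases h5 : s = "design"; · subst h5; decide
  by_cases h6 : s = "performance"; · subst h6; decide
  by_cases h7 : s = "fix"; · subst h7; decide
  by_cases h8 : s = "security"; · subst h8; decide
  by_cases h9 : s = "infrastructure"; · subst h9; decide
  by_cases h10 : s = "breaking"; · subst h10; decide
  by_cases h11 : s = "improvement"; · subst h11; decide
  by_cases h12 : s = "docs"; · subst h12; decide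
  by_cases h13 : s = "refactor"; · subst h13; decide
  have e : pvTypeToTitle = PySem.Dict.mk [("feature","🆕 Neue Features"),("content","🆕 Neue Features"),("gameplay","🎮 Gameplay & UX"),("multiplayer","🎮 Gameplay & UX"),("design","🎨 Design & Look"),("performance","⚡ Performance"),("fix","🐛 Fixes"),("security","🛡️ Stabilität & Security"),("infrastructure","🛡️ Stabilität & Security"),("breaking","🛡️ Stabilität & Security"),("improvement","📖 Weiteres"),("docs","📖 Weiteres"),("refactor","📖 Weiteres")] := by decide
  rw [e]
  simp [pvFind, pvSectionOrder, PySem.Dict.getD_eq_get?_getD,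
    h1,h2,h3,h4,h5,h6,h7,h8,h9,h10,h11,h12,h13, Ne.symm, PySem.Dict.get?]

lemma pvLabel_eq_getD (c : List (String × String)) :
    pvLabel c = pvTypeToTitle.getD (PySem.Str.lower ((PySem.Dict.mk c).getD "type" "")) "📖 Weiteres" :=
  pvTable_eq _

theorem group_changes_for_embed_py_eq (changes : List (List (String × String))) :
    group_changes_for_embed_py changes = group_changes_for_embed_py_alt changes := by
  unfold group_changes_for_embed_py group_changes_for_embed_py_alt
  simp only [← pvLabel_eq_getD]
  have hA : changes.foldl (fun d c =>
      let ctype := PySem.Str.lower ((PySem.Dict.mk c).getD "type" "")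
      let r := pvScanA ctype c pvSectionOrder d
      if r.2 then r.1 else r.1.modify "📖 Weiteres" [] (fun l => l ++ [c]))
      (pvSectionOrder.foldl (fun d p => d.insert p.1 []) PySem.Dict.empty)
    = (changes.map (fun c => (pvLabel c, c))).foldl
        (fun d p => d.modify p.1 [] (fun l => l ++ [p.2]))
        (pvSectionOrder.foldl (fun d p => d.insert p.1 []) PySem.Dict.empty) := by
    rw [List.foldl_map]
    apply PySem.List.foldl_congr_mem
    intro d c _
    exact pvBody_eq d c
  rw [hA]
  simp only [PySem.Dict.getD_foldl_modify_append, pvBuckets0_getD, List.nil_append]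
  have hB := PySem.List.foldl_append_if (l := pvSectionOrder) (acc := [])
    (p := fun sec => !(((changes.map (fun c => (pvLabel c, c))).filter (fun q => q.1 == sec.1)).map (fun q => q.2)).isEmpty)
    (f := fun sec => (sec.1, ((changes.map (fun c => (pvLabel c, c))).filter (fun q => q.1 == sec.1)).map (fun q => q.2)))
  rw [hB]
  simp

-- ===== VERDICT (by name: the statement is the Claim_ definition above) =====
theorem group_changes_for_embed_py_spec : Claim_equal_group_changes_for_embed_py := by
  intro changes _
  exact (group_changes_for_embed_py_eq changes).symm ▸ rfl
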